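-- pv_equiv track=rewrite | github.com/ProdanRaduMatei/pre-news-trading-surveillance | src/pre_news_trading_surveillance/nlp/sec_taxonomy.py | _best_item_type
-- ===== SOURCE A (Python) =====
-- SEC_ITEM_EVENT_TYPE = {
--     "1.01": "major_business_event",
--     "1.02": "major_business_event",
--     "1.03": "litigation_regulatory",
--     "2.01": "mna",
--     "2.02": "earnings",
--     "2.03": "financing",
--     "2.04": "financing",
--     "2.05": "major_business_event",
--     "2.06": "litigation_regulatory",
--     "3.01": "litigation_regulatory",
--     "3.02": "financing",
--     "4.02": "litigation_regulatory",
--     "5.02": "executive_change",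
--     "5.03": "major_business_event",
--     "7.01": "major_business_event",
--     "8.01": "other",
--     "9.01": "other",
-- }
--
-- def _best_item_type(items: list[str]) -> str | None:
--     prioritized = ["2.01", "2.02", "2.03", "3.02", "5.02", "3.01", "4.02", "1.03", "2.06", "1.01", "1.02", "7.01", "8.01"]
--     item_set = set(items)
--     for item in prioritized:
--         if item in item_set:
--             return SEC_ITEM_EVENT_TYPE.get(item)
--     for item in items:
--         event_type = SEC_ITEM_EVENT_TYPE.get(item)
--         if event_type:
--             return event_type
--     return None
-- ===== SOURCE B (Python) =====
-- SEC_ITEM_EVENT_TYPE = {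
--     "1.01": "major_business_event",
--     "1.02": "major_business_event",
--     "1.03": "litigation_regulatory",
--     "2.01": "mna",
--     "2.02": "earnings",
--     "2.03": "financing",
--     "2.04": "financing",
--     "2.05": "major_business_event",
--     "2.06": "litigation_regulatory",
--     "3.01": "litigation_regulatory",
--     "3.02": "financing",
--     "4.02": "litigation_regulatory",
--     "5.02": "executive_change",
--     "5.03": "major_business_event",
--     "7.01": "major_business_event",
--     "8.01": "other",
--     "9.01": "other",
-- }
--
-- _PRIORITIZED = ["2.01", "2.02", "2.03", "3.02", "5.02", "3.01", "4.02", "1.03", "2.06", "1.01", "1.02", "7.01", "8.01"]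
-- _RANK = {item: i for i, item in enumerate(_PRIORITIZED)}
--
--
-- def _best_item_type(items: list[str]) -> str | None:
--     # one fused pass: track the minimum-rank prioritized item and, separately,
--     # the first truthy event type among non-prioritized items as a fallback
--     best_rank = None
--     best_item = None
--     fallback = None
--     for item in items:
--         r = _RANK.get(item)
--         if r is not None:
--             if best_rank is None or r < best_rank:
--                 best_rank = r
--                 best_item = item
--         elif fallback is None:
--             event_type = SEC_ITEM_EVENT_TYPE.get(item)
--             if event_type:
--                 fallback = event_type
--     if best_item is not None:
--         return SEC_ITEM_EVENT_TYPE.get(best_item)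
--     return fallback
-- ===== Notes on version B (the rewrite author's own statement) =====
-- stated objective: alternative
-- what changed: Replaces A's two sequential scans (priority-list scan against a set of the items, then a fallback scan over the items) with one fused pass over the items that tracks the minimum-rank prioritized item via a precomputed item-to-rank dict and, independently, the first truthy fallback event type.
import Mathlib
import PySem

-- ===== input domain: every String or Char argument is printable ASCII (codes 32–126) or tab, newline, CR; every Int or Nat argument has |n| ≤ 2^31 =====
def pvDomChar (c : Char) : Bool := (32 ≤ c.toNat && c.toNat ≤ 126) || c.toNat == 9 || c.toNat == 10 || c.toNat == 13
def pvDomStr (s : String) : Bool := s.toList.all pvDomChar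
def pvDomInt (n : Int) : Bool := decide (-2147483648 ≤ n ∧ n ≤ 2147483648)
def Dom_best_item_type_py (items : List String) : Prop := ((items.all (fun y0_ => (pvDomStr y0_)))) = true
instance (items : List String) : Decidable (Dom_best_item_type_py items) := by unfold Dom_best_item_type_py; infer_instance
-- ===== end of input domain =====

-- B replaces A's two sequential scans with one fused pass over the items (rank dict + fallback accumulator); objective: alternative decomposition, same cost.

-- ===== PORT A =====
def secDict : PySem.Dict String String := PySem.Dict.ofList
  [("1.01", "major_business_event"), ("1.02", "major_business_event"),
   ("1.03", "litigation_regulatory"), ("2.01", "mna"), ("2.02", "earnings"),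
   ("2.03", "financing"), ("2.04", "financing"), ("2.05", "major_business_event"),
   ("2.06", "litigation_regulatory"), ("3.01", "litigation_regulatory"),
   ("3.02", "financing"), ("4.02", "litigation_regulatory"), ("5.02", "executive_change"),
   ("5.03", "major_business_event"), ("7.01", "major_business_event"),
   ("8.01", "other"), ("9.01", "other")]

def prioritizedList : List String :=
  ["2.01", "2.02", "2.03", "3.02", "5.02", "3.01", "4.02", "1.03", "2.06", "1.01", "1.02", "7.01", "8.01"]

-- A's second loop: first truthy SEC_ITEM_EVENT_TYPE.get(item) over items
def aLoop2 : List String → Option String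
  | [] => none
  | item :: rest =>
    match PySem.Dict.get? secDict item with
    | some et => if et ≠ "" then some et else aLoop2 rest
    | none => aLoop2 rest

-- A's first loop: first prioritized item contained in item_set
def aLoop1 (items : List String) (itemSet : PySem.Set String) : List String → Option String
  | [] => aLoop2 items
  | p :: ps =>
    if PySem.Set.contains itemSet p then PySem.Dict.get? secDict p
    else aLoop1 items itemSet ps

def best_item_type_py (items : List String) : Option String :=
  aLoop1 items (PySem.Set.ofList items) prioritizedList

-- ===== PORT B =====
-- _RANK = {item: i for i, item in enumerate(_PRIORITIZED)}
def rankDict : PySem.Dict String Int :=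
  (PySem.List.enumerate prioritizedList).foldl (fun d p => d.insert p.2 p.1) PySem.Dict.empty

-- loop body of B: state = (best_rank, best_item, fallback)
def bStep (st : Option Int × Option String × Option String) (item : String) :
    Option Int × Option String × Option String :=
  match PySem.Dict.get? rankDict item with
  | some r =>
    match st.1 with
    | none => (some r, some item, st.2.2)
    | some b => if r < b then (some r, some item, st.2.2) else st
  | none =>
    match st.2.2 with
    | none =>
      match PySem.Dict.get? secDict item with
      | some et => if et ≠ "" then (st.1, st.2.1, some et) else st
      | none => st
    | some _ => st

def best_item_type_py_alt (items : List String) : Option String :=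
  let st := items.foldl bStep (none, none, none)
  match st.2.1 with
  | some it => PySem.Dict.get? secDict it
  | none => st.2.2

-- ===== PRECONDITION & SPEC =====
def Spec_best_item_type_py (items : List String) (out : Option String) : Prop := out = best_item_type_py_alt items
instance (items : List String) (out : Option String) : Decidable (Spec_best_item_type_py items out) := by unfold Spec_best_item_type_py; infer_instance

-- ===== CLAIM (what is proved, stated in full; the proofs are below) =====
def Claim_equal_best_item_type_py : Prop := ∀ (items : List String), Dom_best_item_type_py items → Spec_best_item_type_py items (best_item_type_py items)

-- ===== LEMMAS AND PROOFS =====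

-- the item a rank stands for
def itemOf (r : Int) : String := prioritizedList.getD r.toNat ""

-- the best_rank component of B's loop, in isolation
def brStep (br : Option Int) (x : String) : Option Int :=
  match PySem.Dict.get? rankDict x with
  | some r => match br with | none => some r | some b => some (if r < b then r else b)
  | none => br

-- the fallback component of B's loop, in isolation
def fbStep (fb : Option String) (x : String) : Option String :=
  match PySem.Dict.get? rankDict x with
  | some _ => fb
  | none =>
    match fb with
    | none =>
      match PySem.Dict.get? secDict x with
      | some et => if et ≠ "" then some et else none
      | none => none
    | some v => some v

lemma rank_get (x : String) (r : Int) (h : PySem.Dict.get? rankDict x = some r) :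
    x = itemOf r ∧ 0 ≤ r ∧ r < 13 := by
  have hm := PySem.Dict.mem_items_of_get?_eq_some rankDict h
  rw [show rankDict.items = [("2.01",0),("2.02",1),("2.03",2),("3.02",3),("5.02",4),("3.01",5),("4.02",6),("1.03",7),("2.06",8),("1.01",9),("1.02",10),("7.01",11),("8.01",12)] from rfl] at hm
  simp only [List.mem_cons, List.not_mem_nil, or_false, Prod.mk.injEq] at hm
  rcases hm with ⟨rfl, rfl⟩|⟨rfl, rfl⟩|⟨rfl, rfl⟩|⟨rfl, rfl⟩|⟨rfl, rfl⟩|⟨rfl, rfl⟩|⟨rfl, rfl⟩|⟨rfl, rfl⟩|⟨rfl, rfl⟩|⟨rfl, rfl⟩|⟨rfl, rfl⟩|⟨rfl, rfl⟩|⟨rfl, rfl⟩ <;> exact ⟨by decide, by decide, by decide⟩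

lemma rank_lit : ∀ i : Nat, i < 13 →
    PySem.Dict.get? rankDict (prioritizedList.getD i "") = some (i : Int) := by decide

lemma bStep_shape (br : Option Int) (fb : Option String) (x : String) :
    bStep (br, br.map itemOf, fb) x = (brStep br x, (brStep br x).map itemOf, fbStep fb x) := by
  cases hr : PySem.Dict.get? rankDict x with
  | some r =>
    have hx := (rank_get x r hr).1
    simp only [bStep, brStep, fbStep, hr]
    cases br with
    | none => simp [hx]
    | some b => by_cases hrb : r < b <;> simp [hx, hrb]
  | none =>
    simp only [bStep, brStep, fbStep, hr]
    cases fb with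
    | some v => rfl
    | none =>
      cases hs : PySem.Dict.get? secDict x with
      | none => rfl
      | some et => by_cases het : et = "" <;> simp [het]

lemma fold_decompose (xs : List String) : ∀ (br : Option Int) (fb : Option String),
    xs.foldl bStep (br, br.map itemOf, fb)
      = (xs.foldl brStep br, (xs.foldl brStep br).map itemOf, xs.foldl fbStep fb) := by
  induction xs with
  | nil => intro br fb; rfl
  | cons x xs ih =>
    intro br fb
    simp only [List.foldl_cons, bStep_shape, ih]

lemma brFold_none (xs : List String) : ∀ br, xs.foldl brStep br = none →
    br = none ∧ ∀ x ∈ xs, PySem.Dict.get? rankDict x = none := by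
  induction xs with
  | nil => intro br h; exact ⟨h, by simp⟩
  | cons x xs ih =>
    intro br h
    simp only [List.foldl_cons] at h
    obtain ⟨h1, h2⟩ := ih _ h
    unfold brStep at h1
    cases hr : PySem.Dict.get? rankDict x with
    | some r => rw [hr] at h1; cases br <;> simp at h1
    | none =>
      rw [hr] at h1
      refine ⟨h1, ?_⟩
      intro y hy
      rcases List.mem_cons.mp hy with rfl | hy
      · exact hr
      · exact h2 y hy

lemma brFold_some (xs : List String) : ∀ br r, xs.foldl brStep br = some r →
    ((br = some r ∨ ∃ x ∈ xs, PySem.Dict.get? rankDict x = some r) ∧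
     (∀ b, br = some b → r ≤ b) ∧
     (∀ x ∈ xs, ∀ r', PySem.Dict.get? rankDict x = some r' → r ≤ r')) := by
  induction xs with
  | nil =>
    intro br r h
    simp only [List.foldl_nil] at h
    refine ⟨Or.inl h, fun b hb => by rw [hb] at h; exact le_of_eq (Option.some_inj.mp h).symm, by simp⟩
  | cons x xs ih =>
    intro br r h
    simp only [List.foldl_cons] at h
    obtain ⟨ih1, ih2, ih3⟩ := ih _ _ h
    cases hr : PySem.Dict.get? rankDict x with
    | none =>
      have hbs : brStep br x = br := by unfold brStep; rw [hr]
      rw [hbs] at ih1 ih2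
      refine ⟨?_, ih2, ?_⟩
      · rcases ih1 with h1 | ⟨y, hy, hyr⟩
        · exact Or.inl h1
        · exact Or.inr ⟨y, List.mem_cons_of_mem _ hy, hyr⟩
      · intro y hy r' hyr
        rcases List.mem_cons.mp hy with rfl | hy
        · rw [hr] at hyr; cases hyr
        · exact ih3 y hy r' hyr
    | some s =>
      cases br with
      | none =>
        have hbs : brStep none x = some s := by unfold brStep; rw [hr]
        rw [hbs] at ih1 ih2
        have hrs : r ≤ s := ih2 s rfl
        refine ⟨?_, by simp, ?_⟩
        · rcases ih1 with h1 | ⟨y, hy, hyr⟩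
          · cases h1; exact Or.inr ⟨x, List.mem_cons_self, hr⟩
          · exact Or.inr ⟨y, List.mem_cons_of_mem _ hy, hyr⟩
        · intro y hy r' hyr
          rcases List.mem_cons.mp hy with rfl | hy
          · rw [hr] at hyr; cases hyr; exact hrs
          · exact ih3 y hy r' hyr
      | some b =>
        have hbs : brStep (some b) x = some (if s < b then s else b) := by unfold brStep; rw [hr]
        rw [hbs] at ih1 ih2
        have hrm : r ≤ if s < b then s else b := ih2 _ rfl
        have hrb : r ≤ b := by split_ifs at hrm <;> omega
        have hrs : r ≤ s := by split_ifs at hrm <;> omega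
        refine ⟨?_, fun c hc => by cases hc; exact hrb, ?_⟩
        · rcases ih1 with h1 | ⟨y, hy, hyr⟩
          · rw [Option.some_inj] at h1
            by_cases hsb : s < b
            · rw [if_pos hsb] at h1
              exact Or.inr ⟨x, List.mem_cons_self, by rw [hr, h1]⟩
            · rw [if_neg hsb] at h1
              exact Or.inl (by rw [h1])
          · exact Or.inr ⟨y, List.mem_cons_of_mem _ hy, hyr⟩
        · intro y hy r' hyr
          rcases List.mem_cons.mp hy with rfl | hy
          · rw [hr] at hyr; cases hyr; exact hrs
          · exact ih3 y hy r' hyr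

lemma fbFold_some (xs : List String) : ∀ v, xs.foldl fbStep (some v) = some v := by
  induction xs with
  | nil => intro v; rfl
  | cons x xs ih => intro v; simp only [List.foldl_cons, fbStep]; cases PySem.Dict.get? rankDict x <;> exact ih v

lemma aLoop2_eq_fbFold (xs : List String) (h : ∀ x ∈ xs, PySem.Dict.get? rankDict x = none) :
    aLoop2 xs = xs.foldl fbStep none := by
  induction xs with
  | nil => rfl
  | cons x xs ih =>
    have hx := h x List.mem_cons_self
    have hrest := fun y hy => h y (List.mem_cons_of_mem _ hy)
    simp only [aLoop2, List.foldl_cons, fbStep, hx]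
    cases hs : PySem.Dict.get? secDict x with
    | none => exact ih hrest
    | some et =>
      by_cases het : et = ""
      · simp only [het, ne_eq, not_true_eq_false, if_false]
        exact ih hrest
      · simp only [ne_eq, het, not_false_eq_true, if_true]
        exact (fbFold_some xs et).symm

lemma contains_ofList_true (items : List String) (q : String) (hq : q ∈ items) :
    PySem.Set.contains (PySem.Set.ofList items) q = true := by
  rw [PySem.Set.contains_iff, PySem.Set.mem_ofList]; exact hq

lemma contains_ofList_false (items : List String) (q : String) (hq : q ∉ items) :
    PySem.Set.contains (PySem.Set.ofList items) q = false := by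
  rw [← Bool.not_eq_true, PySem.Set.contains_iff, PySem.Set.mem_ofList]; exact hq

lemma aLoop1_none (items : List String) (S : PySem.Set String) :
    ∀ ps, (∀ p ∈ ps, PySem.Set.contains S p = false) → aLoop1 items S ps = aLoop2 items := by
  intro ps
  induction ps with
  | nil => intro _; rfl
  | cons p ps ih =>
    intro h
    rw [aLoop1, h p List.mem_cons_self]
    exact ih fun q hq => h q (List.mem_cons_of_mem _ hq)

lemma aLoop1_idx (items : List String) (S : PySem.Set String) :
    ∀ (ps : List String) (r : Nat), r < ps.length →
      (∀ i : Nat, i < r → PySem.Set.contains S (ps.getD i "") = false) →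
      PySem.Set.contains S (ps.getD r "") = true →
      aLoop1 items S ps = PySem.Dict.get? secDict (ps.getD r "") := by
  intro ps
  induction ps with
  | nil => intro r hr; simp at hr
  | cons p ps ih =>
    intro r hr hlt hmem
    cases r with
    | zero =>
      simp only [List.getD_cons_zero] at hmem ⊢
      rw [aLoop1, hmem]
      simp
    | succ n =>
      have h0 : PySem.Set.contains S p = false := by
        have := hlt 0 (Nat.succ_pos n)
        simpa using this
      rw [aLoop1, h0]
      simp only [List.getD_cons_succ] at hmem ⊢
      exact ih n (by simpa using hr) (fun i hi => by simpa using hlt (i + 1) (by omega)) hmem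

lemma A_eq_fallback (items : List String) (h : ∀ x ∈ items, PySem.Dict.get? rankDict x = none) :
    best_item_type_py items = aLoop2 items := by
  unfold best_item_type_py
  apply aLoop1_none
  intro p hp
  apply contains_ofList_false
  intro hmem
  have hne : PySem.Dict.get? rankDict p ≠ none := by fin_cases hp <;> decide
  exact hne (h p hmem)

lemma A_eq_select (items : List String) (r : Nat) (hr : r < 13)
    (hmem : prioritizedList.getD r "" ∈ items)
    (hlt : ∀ i : Nat, i < r → prioritizedList.getD i "" ∉ items) :
    best_item_type_py items = PySem.Dict.get? secDict (prioritizedList.getD r "") := by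
  unfold best_item_type_py
  exact aLoop1_idx items _ prioritizedList r (by rw [show prioritizedList.length = 13 from rfl]; exact hr)
    (fun i hi => contains_ofList_false items _ (hlt i hi))
    (contains_ofList_true items _ hmem)

lemma main_eq (items : List String) : best_item_type_py items = best_item_type_py_alt items := by
  have hB : best_item_type_py_alt items
      = match (items.foldl brStep none).map itemOf with
        | some it => PySem.Dict.get? secDict it
        | none => items.foldl fbStep none := by
    show (match (items.foldl bStep (none, none, none)).2.1 with
          | some it => PySem.Dict.get? secDict it
          | none => (items.foldl bStep (none, none, none)).2.2) = _
    rw [show items.foldl bStep (none, none, none)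
          = items.foldl bStep (none, (none : Option Int).map itemOf, none) from rfl,
        fold_decompose]
  cases hm : items.foldl brStep none with
  | none =>
    have hall := (brFold_none items none hm).2
    rw [hB, hm]
    show best_item_type_py items = items.foldl fbStep none
    rw [A_eq_fallback items hall, aLoop2_eq_fbFold items hall]
  | some r =>
    obtain ⟨hmem, -, hmin⟩ := brFold_some items none r hm
    rcases hmem with h | ⟨x, hx, hrx⟩
    · exact absurd h (by simp)
    · obtain ⟨hxe, hr0, hr13⟩ := rank_get x r hrx
      have hrn : r.toNat < 13 := by omega
      have hmem' : prioritizedList.getD r.toNat "" ∈ items := by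
        show itemOf r ∈ items
        rw [← hxe]; exact hxe ▸ hx
      have hlt : ∀ i : Nat, i < r.toNat → prioritizedList.getD i "" ∉ items := by
        intro i hi hin
        have := hmin _ hin _ (rank_lit i (by omega))
        omega
      rw [hB, hm, A_eq_select items r.toNat hrn hmem' hlt]
      rfl

-- ===== VERDICT (by name: the statement is the Claim_ definition above) =====
theorem best_item_type_py_spec : Claim_equal_best_item_type_py := by
  intro items _
  unfold Spec_best_item_type_py
  exact main_eq items
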